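-- pv_equiv track=rewrite | github.com/Math-DongDong/MathDay | 1_π 외우자!.py | format_pi_digits
-- ===== SOURCE A (Python) =====
-- def format_pi_digits(digits):
--     """파이 숫자를 5자리씩 띄어쓰고, 6묶음(30자리)마다 줄바꿈합니다."""
--     #초기 설정
--     formatted = "## "
--     group_count = 0
--     #반복문 설정(5자리씩 건너띄며 처리)
--     for i in range(0, len(digits), 5):
--         #5자리씩 파이값 자르기
--         group = digits[i:i+5]
--         if group_count > 0 and group_count % 6 == 0: #묶음이 6가 되면 줄바꿈
--             formatted += "  \n## "
--         elif group_count > 0: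
--                 formatted += "    " # 묶음 사이에 4칸 공백 추가
--         #잘라낸 그룹을 문자열 뒤에 추가 & 그룹카운트 1증가
--         formatted += group
--         group_count += 1
--     return formatted
-- ===== SOURCE B (Python) =====
-- def format_pi_digits(digits):
--     """파이 숫자를 5자리씩 띄어쓰고, 6묶음(30자리)마다 줄바꿈합니다."""
--     # two-level grouping: 5-char groups, then lines of 6 groups, plain joins
--     groups = [digits[i:i+5] for i in range(0, len(digits), 5)]
--     lines = ["    ".join(groups[j:j+6]) for j in range(0, len(groups), 6)]
--     return "## " + "  \n## ".join(lines)
-- ===== Notes on version B (the rewrite author's own statement) =====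
-- stated objective: simpler
-- what changed: Replaces the single flat loop with a running group counter and modulo-6 line-break branching by a two-level grouping: build the 5-char groups, chunk them into lines of 6 joined with four spaces, and join the lines once with the line separator.
import Mathlib
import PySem

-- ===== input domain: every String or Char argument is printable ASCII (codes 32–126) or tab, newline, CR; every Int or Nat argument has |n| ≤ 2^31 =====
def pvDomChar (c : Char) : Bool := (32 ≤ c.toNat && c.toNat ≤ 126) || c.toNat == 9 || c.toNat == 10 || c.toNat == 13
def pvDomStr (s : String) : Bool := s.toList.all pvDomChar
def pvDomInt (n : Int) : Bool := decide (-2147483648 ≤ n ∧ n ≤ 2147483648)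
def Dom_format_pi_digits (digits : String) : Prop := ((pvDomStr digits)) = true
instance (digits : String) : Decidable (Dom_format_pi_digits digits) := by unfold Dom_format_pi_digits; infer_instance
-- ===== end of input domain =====

-- B replaces A's flat loop with counter/modulo-6 bookkeeping by two-level grouping
-- (5-char groups, then lines of 6 groups, plain joins); objective: simpler, same cost.

-- ===== PORT A =====
-- flat loop over range(0, len, 5) carrying (formatted, group_count)
def format_pi_digits (digits : String) : String :=
  String.ofList
    ((PySem.List.pyRange 0 (PySem.Chars.len digits.toList) 5).foldl
      (fun (st : List Char × Int) i =>
        ((if st.2 > 0 ∧ PySem.Int.mod st.2 6 = 0 then st.1 ++ [' ',' ','\n','#','#',' ']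
          else if st.2 > 0 then st.1 ++ [' ',' ',' ',' ']
          else st.1) ++ PySem.Chars.slice digits.toList (some i) (some (i + 5)),
         st.2 + 1))
      (['#','#',' '], 0)).1

-- ===== PORT B =====
-- port of Source B: 5-char groups, then one line per 6 groups, joined
def format_pi_digits_alt (digits : String) : String :=
  let groups := (PySem.List.pyRange 0 (PySem.Chars.len digits.toList) 5).map
      (fun i => PySem.Chars.slice digits.toList (some i) (some (i + 5)))
  let lines := (PySem.List.pyRange 0 (groups.length : Int) 6).map
      (fun j => PySem.Chars.join [' ',' ',' ',' '] (PySem.List.slice groups (some j) (some (j + 6))))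
  String.ofList (['#','#',' '] ++ PySem.Chars.join [' ',' ','\n','#','#',' '] lines)

-- ===== PRECONDITION & SPEC =====
def Spec_format_pi_digits (digits : String) (out : String) : Prop := out = format_pi_digits_alt digits
instance (digits : String) (out : String) : Decidable (Spec_format_pi_digits digits out) := by unfold Spec_format_pi_digits; infer_instance

-- ===== CLAIM (what is proved, stated in full; the proofs are below) =====
def Claim_equal_format_pi_digits : Prop := ∀ (digits : String), Dom_format_pi_digits digits → Spec_format_pi_digits digits (format_pi_digits digits)

-- ===== LEMMAS AND PROOFS =====

-- proof-side chunking recursion, shown equal to B's line comprehension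
lemma pvDrop6Lt (gs : List (List Char)) (h : ¬ gs = []) :
    (PySem.List.slice gs (some 6) none).length < gs.length := by
  have h2 : PySem.List.slice gs (some (6:Int)) none = gs.drop 6 := by
    simpa using PySem.List.slice_from_natCast gs 6
  rw [h2, List.length_drop]
  have : gs.length ≠ 0 := by simpa using h
  omega

def bChunkLines (gs : List (List Char)) : List (List Char) :=
  if h : gs = [] then []
  else PySem.Chars.join [' ',' ',' ',' '] (PySem.List.slice gs none (some 6))
        :: bChunkLines (PySem.List.slice gs (some 6) none)
termination_by gs.length
decreasing_by exact pvDrop6Lt gs h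

lemma bChunkLines_nil : bChunkLines [] = [] := by
  rw [bChunkLines]; simp

lemma bChunkLines_cons (g : List Char) (t : List (List Char)) :
    bChunkLines (g :: t)
      = PySem.Chars.join [' ',' ',' ',' '] (g :: t.take 5) :: bChunkLines (t.drop 5) := by
  rw [bChunkLines]
  have h1 : PySem.List.slice (g :: t) none (some (6:Int)) = g :: t.take 5 := by
    simpa using PySem.List.slice_to_natCast (g :: t) 6
  have h2 : PySem.List.slice (g :: t) (some (6:Int)) none = t.drop 5 := by
    simpa using PySem.List.slice_from_natCast (g :: t) 6
  simp [h1, h2]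

lemma pvRange6_nil (b : Int) (h : b ≤ 0) : PySem.List.pyRange 0 b 6 = [] := by
  rw [PySem.List.pyRange_of_pos 0 b (by norm_num)]
  simp [show ¬ (0:Int) < b by omega]

lemma pvRange6_cons (b : Int) (h : 0 < b) :
    PySem.List.pyRange 0 b 6 = 0 :: (PySem.List.pyRange 0 (b - 6) 6).map (· + 6) := by
  rw [PySem.List.pyRange_of_pos 0 b (by norm_num), PySem.List.pyRange_of_pos 0 (b-6) (by norm_num)]
  have hm : (if (0:Int) < b then ((b - 0 + 6 - 1) / 6).toNat else 0)
      = (if (0:Int) < b - 6 then ((b - 6 - 0 + 6 - 1) / 6).toNat else 0) + 1 := by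
    split_ifs <;> omega
  rw [hm, List.range_succ_eq_map]
  simp [List.map_map, Function.comp_def, mul_add]

lemma pvSliceShift (gs : List (List Char)) (j : Int) (hj : 0 ≤ j) :
    PySem.List.slice gs (some (j + 6)) (some (j + 6 + 6))
      = PySem.List.slice (gs.drop 6) (some j) (some (j + 6)) := by
  rw [PySem.List.slice_toNat _ (by omega) (by omega), PySem.List.slice_toNat _ hj (by omega)]
  have e1 : (j + 6).toNat = j.toNat + 6 := by omega
  have e2 : (j + 6 + 6).toNat = j.toNat + 12 := by omega
  rw [e1, e2]
  have e5 : j.toNat + 12 - (j.toNat + 6) = 6 := by omega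
  have e6 : j.toNat + 6 - j.toNat = 6 := by omega
  rw [e5, e6]
  congr 1
  rw [List.drop_drop]
  congr 1
  omega

lemma pvChunkMap : ∀ (n : Nat) (gs : List (List Char)), gs.length ≤ n →
    (PySem.List.pyRange 0 (gs.length : Int) 6).map
      (fun j => PySem.Chars.join [' ',' ',' ',' '] (PySem.List.slice gs (some j) (some (j + 6))))
    = bChunkLines gs := by
  intro n
  induction n with
  | zero =>
    intro gs hn
    have hgs : gs = [] := List.length_eq_zero_iff.mp (by omega)
    subst hgs
    simp [pvRange6_nil 0 le_rfl, bChunkLines_nil]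
  | succ n ih =>
    intro gs hn
    rcases gs with _ | ⟨g, t⟩
    · simp [pvRange6_nil 0 le_rfl, bChunkLines_nil]
    · have hb : (0:Int) < (((g :: t).length : Nat) : Int) := by
        push_cast [List.length_cons]; omega
      rw [pvRange6_cons _ hb, List.map_cons, List.map_map]
      have hhead : PySem.List.slice (g :: t) (some (0:Int)) (some ((0:Int) + 6)) = g :: t.take 5 := by
        rw [show ((0:Int) + 6) = ((6:Nat) : Int) by norm_num]
        rw [show (some (0:Int)) = (some ((0:Nat) : Int)) by norm_num]
        rw [PySem.List.slice_natCast]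
        simp
      rw [bChunkLines_cons, hhead]
      congr 1
      have hfun : ∀ j ∈ PySem.List.pyRange 0 ((((g :: t).length : Nat) : Int) - 6) 6,
          ((fun j => PySem.Chars.join [' ',' ',' ',' ']
              (PySem.List.slice (g :: t) (some j) (some (j + 6)))) ∘ (· + 6)) j
            = PySem.Chars.join [' ',' ',' ',' '] (PySem.List.slice (t.drop 5) (some j) (some (j + 6))) := by
        intro j hj
        have hge : 0 ≤ j := by
          rcases Decidable.em (0 < (((g :: t).length : Nat) : Int) - 6) with hlt | hnl
          · exact ((PySem.List.mem_pyRange_iff_of_pos (by norm_num) j).mp hj).1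
          · rw [pvRange6_nil _ (by omega)] at hj; simp at hj
        simp only [Function.comp_apply]
        rw [pvSliceShift _ j hge]
        rfl
      rw [List.map_congr_left hfun]
      rcases Decidable.em (6 < (g :: t).length) with h6' | hnl
      · have h6 := h6'
        have hlen : (((t.drop 5).length : Nat) : Int) = (((g :: t).length : Nat) : Int) - 6 := by
          rw [List.length_drop]
          simp only [List.length_cons] at h6 ⊢
          push_cast
          omega
        rw [← hlen]
        exact ih (t.drop 5) (by rw [List.length_drop]; simp only [List.length_cons] at hn; omega)
      · have h6 : (g :: t).length ≤ 6 := by omega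
        have ht5 : t.drop 5 = [] := List.drop_eq_nil_iff.mpr
          (by simp only [List.length_cons] at h6; omega)
        rw [ht5]
        have hle : ((((g :: t).length : Nat) : Int) - 6) ≤ 0 := by omega
        rw [pvRange6_nil _ hle]
        simp [bChunkLines_nil]


-- the separator A writes before the group at index c
def pvSep (c : Int) : List Char :=
  if c > 0 ∧ PySem.Int.mod c 6 = 0 then [' ',' ','\n','#','#',' ']
  else if c > 0 then [' ',' ',' ',' '] else []

-- the tail of A's output from group counter c on
def pvS (c : Int) : List (List Char) → List Char
  | [] => []
  | g :: t => pvSep c ++ (g ++ pvS (c + 1) t)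

-- groups inside a line, each preceded by four spaces
def pvFlat : List (List Char) → List Char
  | [] => []
  | g :: t => [' ',' ',' ',' '] ++ (g ++ pvFlat t)

lemma pvFoldA (ds : List Char) (R : List Int) : ∀ (acc : List Char) (c : Int),
    (R.foldl
      (fun (st : List Char × Int) i =>
        ((if st.2 > 0 ∧ PySem.Int.mod st.2 6 = 0 then st.1 ++ [' ',' ','\n','#','#',' ']
          else if st.2 > 0 then st.1 ++ [' ',' ',' ',' ']
          else st.1) ++ PySem.Chars.slice ds (some i) (some (i + 5)),
         st.2 + 1)) (acc, c)).1
    = acc ++ pvS c (R.map (fun i => PySem.Chars.slice ds (some i) (some (i + 5)))) := by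
  induction R with
  | nil => intro acc c; simp [pvS]
  | cons i R ih =>
    intro acc c
    simp only [List.foldl_cons, List.map_cons, ih, pvS, pvSep]
    split_ifs <;> simp

lemma pvS_append (xs ys : List (List Char)) : ∀ (c : Int),
    pvS c (xs ++ ys) = pvS c xs ++ pvS (c + xs.length) ys := by
  induction xs with
  | nil => intro c; simp [pvS]
  | cons g t ih =>
    intro c
    have h : c + ((t.length : Int) + 1) = (c + 1) + t.length := by ring
    simp only [List.cons_append, pvS, ih (c + 1), List.length_cons]
    push_cast
    rw [h]
    simp

lemma pvS_flat : ∀ (t : List (List Char)) (c : Int), 0 < c →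
    PySem.Int.mod c 6 ≠ 0 → PySem.Int.mod c 6 + t.length ≤ 6 →
    pvS c t = pvFlat t := by
  intro t
  induction t with
  | nil => intro c _ _ _; rfl
  | cons g t ih =>
    intro c hc hm hb
    have e1 : PySem.Int.mod c 6 = c % 6 := PySem.Int.mod_eq_emod_of_pos (by omega)
    have e2 : PySem.Int.mod (c + 1) 6 = (c + 1) % 6 := PySem.Int.mod_eq_emod_of_pos (by omega)
    rw [e1] at hm hb
    have hsep : pvSep c = [' ',' ',' ',' '] := by
      unfold pvSep
      rw [if_neg, if_pos hc]
      rintro ⟨_, h0⟩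
      rw [e1] at h0
      exact hm h0
    simp only [pvS, pvFlat, hsep]
    congr 2
    rcases t with _ | ⟨x, t'⟩
    · rfl
    · exact ih (c + 1) (by omega)
        (by rw [e2]; simp only [List.length_cons] at hb; omega)
        (by rw [e2]; simp only [List.length_cons] at hb ⊢; push_cast; omega)

lemma pvLine (t : List (List Char)) : ∀ (g : List Char),
    PySem.Chars.join [' ',' ',' ',' '] (g :: t) = g ++ pvFlat t := by
  induction t with
  | nil => intro g; simp [PySem.Chars.join_singleton, pvFlat]
  | cons x t' ih =>
    intro g
    rw [PySem.Chars.join_cons_cons, ih x]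
    simp [pvFlat]

lemma pvS_lines : ∀ (n : Nat) (gs : List (List Char)) (c : Int), gs.length ≤ n → 0 ≤ c →
    PySem.Int.mod c 6 = 0 → gs ≠ [] →
    pvS c gs = (if c = 0 then [] else [' ',' ','\n','#','#',' '])
      ++ PySem.Chars.join [' ',' ','\n','#','#',' '] (bChunkLines gs) := by
  intro n
  induction n with
  | zero =>
    intro gs c hn _ _ hne
    cases gs with
    | nil => exact absurd rfl hne
    | cons g t => simp at hn
  | succ n ih =>
    intro gs c hn hc hm hne
    rcases gs with _ | ⟨g, t⟩
    · exact absurd rfl hne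
    have hm0 : PySem.Int.mod c 6 = c % 6 := by
      rcases eq_or_lt_of_le hc with h0 | h0
      · rw [← h0]; rfl
      · exact PySem.Int.mod_eq_emod_of_pos (by omega)
    rw [hm0] at hm
    have hsep : pvSep c = (if c = 0 then [] else [' ',' ','\n','#','#',' ']) := by
      unfold pvSep
      rcases eq_or_lt_of_le hc with h0 | h0
      · simp [← h0]
      · rw [if_pos ⟨h0, by rw [hm0]; exact hm⟩, if_neg (by omega)]
    have ht : t = t.take 5 ++ t.drop 5 := (List.take_append_drop 5 t).symm
    have hm1 : PySem.Int.mod (c + 1) 6 = (c + 1) % 6 := PySem.Int.mod_eq_emod_of_pos (by omega)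
    have hflat : pvS (c + 1) (t.take 5) = pvFlat (t.take 5) := by
      apply pvS_flat _ (c + 1) (by omega) (by rw [hm1]; omega)
      rw [hm1]
      have : (t.take 5).length ≤ 5 := by simp
      omega
    rw [bChunkLines_cons, pvLine]
    show pvSep c ++ (g ++ pvS (c + 1) t) = _
    conv_lhs => rw [ht]
    rw [pvS_append, hflat, hsep]
    rcases Decidable.em (t.drop 5 = []) with hd | hd
    · rw [hd, bChunkLines_nil, PySem.Chars.join_singleton]
      simp [pvS]
    · -- the tail holds at least one more group: the first line is a full 6
      have h5 : 5 ≤ t.length := by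
        by_contra hlt
        exact hd (List.drop_eq_nil_iff.mpr (by omega))
      have hcast : ((t.take 5).length : Int) = 5 := by
        rw [List.length_take]
        omega
      rw [hcast]
      have h6 : PySem.Int.mod (c + 1 + 5) 6 = (c + 6) % 6 := by
        rw [PySem.Int.mod_eq_emod_of_pos (by omega)]
        ring_nf
      have hrec := ih (t.drop 5) (c + 1 + 5)
        (by rw [List.length_drop]; simp only [List.length_cons] at hn; omega)
        (by omega) (by rw [h6]; omega) hd
      rw [if_neg (by omega)] at hrec
      rw [hrec]
      have hbne : bChunkLines (t.drop 5) ≠ [] := by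
        rcases hx : t.drop 5 with _ | ⟨x, r⟩
        · exact absurd hx hd
        · rw [bChunkLines_cons]
          simp
      rcases hbc : bChunkLines (t.drop 5) with _ | ⟨l, ls⟩
      · exact absurd hbc hbne
      · rw [PySem.Chars.join_cons_cons]
        simp

-- ===== VERDICT (by name: the statement is the Claim_ definition above) =====
theorem format_pi_digits_spec : Claim_equal_format_pi_digits := by
  intro digits _
  unfold Spec_format_pi_digits format_pi_digits format_pi_digits_alt
  congr 1
  rw [pvFoldA]
  set gs := (PySem.List.pyRange 0 (PySem.Chars.len digits.toList) 5).map
    (fun i => PySem.Chars.slice digits.toList (some i) (some (i + 5))) with hgs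
  rw [pvChunkMap gs.length gs le_rfl]
  rcases Decidable.em (gs = []) with h | h
  · rw [h, bChunkLines_nil]
    simp [pvS, PySem.Chars.join_nil]
  · rw [pvS_lines gs.length gs 0 le_rfl le_rfl rfl h]
    simp
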